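-- pv_equiv track=rewrite | github.com/energizah/cctree | dump_screenshots.py | _focus_around
-- ===== SOURCE A (Python) =====
-- def _focus_around(
--     lines: list[str],
--     focus_terms: list[str],
--     context: int = 3,
-- ) -> list[str]:
--     """Return lines near focus_terms with '...' elision for gaps."""
--     if not lines:
--         return []
--     hits: set[int] = set()
--     for i, line in enumerate(lines):
--         low = line.lower()
--         if any(t.lower() in low for t in focus_terms):
--             for j in range(max(0, i - context), min(len(lines), i + context + 1)):
--                 hits.add(j)
--
--     if not hits:
--         return lines  # no focus terms found, show all
--
--     result = []
--     prev = -2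
--     for i in sorted(hits):
--         if i > prev + 1:
--             result.append("  ...")
--         result.append(lines[i])
--         prev = i
--     if prev < len(lines) - 1:
--         result.append("  ...")
--     return result
-- ===== SOURCE B (Python) =====
-- def _focus_around(lines, focus_terms, context=3):
--     """Merge the match windows into disjoint [lo, hi) intervals, then emit
--     whole slices with '  ...' separators; no per-index set/mask is built."""
--     n = len(lines)
--     intervals = []  # sorted, disjoint, non-touching, non-empty half-open windows
--     for i, line in enumerate(lines):
--         low = line.lower()
--         if not any(t.lower() in low for t in focus_terms):
--             continue
--         lo, hi = max(0, i - context), min(n, i + context + 1)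
--         if lo >= hi:
--             continue
--         if intervals and lo <= intervals[-1][1]:
--             intervals[-1][1] = hi
--         else:
--             intervals.append([lo, hi])
--     if not intervals:
--         return lines
--     out = []
--     for lo, hi in intervals:
--         out.append("  ...")
--         out.extend(lines[lo:hi])
--     if intervals[-1][1] < n:
--         out.append("  ...")
--     return out
-- ===== Notes on version B (the rewrite author's own statement) =====
-- stated objective: alternative
-- what changed: B never builds A's per-index hit set: it merges the match windows into disjoint [lo,hi) intervals in one pass (extending the last interval when windows touch) and then emits whole slices lines[lo:hi] separated by ' ...', so the per-index marking, the set and the sorted() call all disappear.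
import Mathlib
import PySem

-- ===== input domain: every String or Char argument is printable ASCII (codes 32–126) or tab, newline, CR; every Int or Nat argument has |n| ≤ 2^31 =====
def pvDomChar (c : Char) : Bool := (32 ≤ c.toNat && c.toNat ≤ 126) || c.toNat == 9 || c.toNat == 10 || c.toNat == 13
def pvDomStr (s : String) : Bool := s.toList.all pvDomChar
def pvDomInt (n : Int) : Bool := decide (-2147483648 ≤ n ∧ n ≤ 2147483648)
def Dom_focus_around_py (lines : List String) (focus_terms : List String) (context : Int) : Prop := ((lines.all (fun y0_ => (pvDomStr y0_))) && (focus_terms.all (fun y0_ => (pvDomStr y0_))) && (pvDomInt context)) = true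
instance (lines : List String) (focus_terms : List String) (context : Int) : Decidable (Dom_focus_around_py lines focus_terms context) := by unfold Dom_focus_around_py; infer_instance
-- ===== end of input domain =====

-- B replaces A's per-index hit set (+ sorted()) by merging the match windows into
-- disjoint intervals and emitting whole slices; objective: alternative algorithm.

-- ===== PORT A =====
-- A-side helpers: the body of A's hit-marking loop, hoisted to a name
def pvAstep (lines : List String) (focus_terms : List String) (context : Int)
    (hits : PySem.Set Int) (p : Int × String) : PySem.Set Int :=
  if focus_terms.any (fun t => PySem.Str.isIn (PySem.Str.lower t) (PySem.Str.lower p.2)) then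
    (PySem.List.pyRange (max 0 (p.1 - context)) (min ((lines.length : Int)) (p.1 + context + 1)) 1).foldl
      PySem.Set.add hits
  else hits

def pvAHits (lines : List String) (focus_terms : List String) (context : Int) : PySem.Set Int :=
  (PySem.List.enumerate lines).foldl (pvAstep lines focus_terms context) PySem.Set.empty

-- the result/prev loop over sorted(hits); lines[i] is always in range so pyGetD is exact
def pvAEmit (lines : List String) (idxs : List Int) : List String × Int :=
  idxs.foldl (fun st i =>
    ((if st.2 + 1 < i then st.1 ++ ["  ..."] else st.1) ++ [PySem.List.pyGetD lines i ""], i)) ([], -2)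

def focus_around_py (lines : List String) (focus_terms : List String) (context : Int) : List String :=
  if lines = [] then []
  else if pvAHits lines focus_terms context = [] then lines
  else if (pvAEmit lines (PySem.List.sorted (pvAHits lines focus_terms context) (fun x => x))).2 < (lines.length : Int) - 1 then
    (pvAEmit lines (PySem.List.sorted (pvAHits lines focus_terms context) (fun x => x))).1 ++ ["  ..."]
  else
    (pvAEmit lines (PySem.List.sorted (pvAHits lines focus_terms context) (fun x => x))).1

-- ===== PORT B =====
-- B-side helpers: the body of B's interval-merging loop, hoisted to a name
def pvBstep (lines : List String) (focus_terms : List String) (context : Int)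
    (ivs : List (Int × Int)) (p : Int × String) : List (Int × Int) :=
  if !(focus_terms.any (fun t => PySem.Str.isIn (PySem.Str.lower t) (PySem.Str.lower p.2))) then ivs
  else
    let lo := max 0 (p.1 - context)
    let hi := min ((lines.length : Int)) (p.1 + context + 1)
    if hi ≤ lo then ivs
    else
      match ivs.getLast? with
      | none => ivs ++ [(lo, hi)]
      | some last => if lo ≤ last.2 then ivs.dropLast ++ [(last.1, hi)] else ivs ++ [(lo, hi)]

def pvBIntervals (lines : List String) (focus_terms : List String) (context : Int) : List (Int × Int) :=
  (PySem.List.enumerate lines).foldl (pvBstep lines focus_terms context) []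

def focus_around_py_alt (lines : List String) (focus_terms : List String) (context : Int) : List String :=
  if pvBIntervals lines focus_terms context = [] then lines
  else
    ((pvBIntervals lines focus_terms context).foldl
        (fun out iv => (out ++ ["  ..."]) ++ PySem.List.slice lines (some iv.1) (some iv.2)) [])
      ++ (if (PySem.List.pyGetD (pvBIntervals lines focus_terms context) (-1) ((0 : Int), (0 : Int))).2 < (lines.length : Int) then ["  ..."] else [])

-- ===== PRECONDITION & SPEC =====
def Spec_focus_around_py (lines : List String) (focus_terms : List String) (context : Int) (out : List String) : Prop := out = focus_around_py_alt lines focus_terms context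
instance (lines : List String) (focus_terms : List String) (context : Int) (out : List String) : Decidable (Spec_focus_around_py lines focus_terms context out) := by unfold Spec_focus_around_py; infer_instance

-- ===== CLAIM (what is proved, stated in full; the proofs are below) =====
def Claim_equal_focus_around_py : Prop := ∀ (lines : List String) (focus_terms : List String) (context : Int), Dom_focus_around_py lines focus_terms context → Spec_focus_around_py lines focus_terms context (focus_around_py lines focus_terms context)

-- ===== LEMMAS AND PROOFS =====

-- joint invariant of A's hit-set and B's interval loop (they fold the same list)
theorem pvJoint (lines : List String) (focus_terms : List String) (context : Int)
    (E : List (Int × String)) (hits : List Int) (ivs : List (Int × Int)) (b : Int)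
    (hE : E.Pairwise (fun p q => p.1 < q.1))
    (hEb : ∀ p ∈ E, b ≤ p.1)
    (hnd : hits.Nodup)
    (hcov : ∀ x : Int, x ∈ hits ↔ ∃ iv ∈ ivs, iv.1 ≤ x ∧ x < iv.2)
    (hpw : ivs.Pairwise (fun a c => a.2 < c.1))
    (hbd : ∀ iv ∈ ivs, 0 ≤ iv.1 ∧ iv.1 < iv.2 ∧ iv.2 ≤ (lines.length : Int) ∧
      iv.1 ≤ max 0 (b - context) ∧ iv.2 ≤ min ((lines.length : Int)) (b + context + 1)) :
    ∃ b', b ≤ b' ∧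
      (E.foldl (pvAstep lines focus_terms context) hits).Nodup ∧
      (∀ x : Int, x ∈ E.foldl (pvAstep lines focus_terms context) hits ↔
        ∃ iv ∈ E.foldl (pvBstep lines focus_terms context) ivs, iv.1 ≤ x ∧ x < iv.2) ∧
      (E.foldl (pvBstep lines focus_terms context) ivs).Pairwise (fun a c => a.2 < c.1) ∧
      (∀ iv ∈ E.foldl (pvBstep lines focus_terms context) ivs, 0 ≤ iv.1 ∧ iv.1 < iv.2 ∧
        iv.2 ≤ (lines.length : Int) ∧ iv.1 ≤ max 0 (b' - context) ∧
        iv.2 ≤ min ((lines.length : Int)) (b' + context + 1)) := by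
  induction E generalizing hits ivs b with
  | nil => exact ⟨b, le_refl b, hnd, hcov, hpw, hbd⟩
  | cons p E ih =>
    obtain ⟨hEp, hEtail⟩ := List.pairwise_cons.1 hE
    have hbp : b ≤ p.1 := hEb p (by simp)
    have hEb' : ∀ q ∈ E, p.1 ≤ q.1 := fun q hq => le_of_lt (hEp q hq)
    have hbd' : ∀ iv ∈ ivs, 0 ≤ iv.1 ∧ iv.1 < iv.2 ∧ iv.2 ≤ (lines.length : Int) ∧
        iv.1 ≤ max 0 (p.1 - context) ∧ iv.2 ≤ min ((lines.length : Int)) (p.1 + context + 1) := by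
      intro iv h
      have := hbd iv h
      refine ⟨this.1, this.2.1, this.2.2.1, ?_, ?_⟩ <;> omega
    simp only [List.foldl_cons]
    by_cases hm : (focus_terms.any (fun t => PySem.Str.isIn (PySem.Str.lower t) (PySem.Str.lower p.2))) = true
    · -- the line matches: A adds the window, B merges/appends it
      have hA : pvAstep lines focus_terms context hits p =
          PySem.Set.update hits (PySem.List.pyRange (max 0 (p.1 - context)) (min ((lines.length : Int)) (p.1 + context + 1)) 1) := by
        simp only [pvAstep, hm, if_true]
        rfl
      by_cases hwin : min ((lines.length : Int)) (p.1 + context + 1) ≤ max 0 (p.1 - context)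
      · -- empty window: nothing changes
        have hrange : PySem.List.pyRange (max 0 (p.1 - context)) (min ((lines.length : Int)) (p.1 + context + 1)) 1 = [] := by
          rw [PySem.List.pyRange_one]
          have : (min ((lines.length : Int)) (p.1 + context + 1) - max 0 (p.1 - context)).toNat = 0 := by omega
          rw [this]
          rfl
        have hB : pvBstep lines focus_terms context ivs p = ivs := by
          simp only [pvBstep, hm, Bool.not_true, Bool.false_eq_true, if_false]
          rw [if_pos hwin]
        rw [hA, hB, hrange]
        obtain ⟨b', hb', rest⟩ := ih _ _ p.1 hEtail hEb' hnd hcov hpw hbd'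
        exact ⟨b', by omega, rest⟩
      · -- non-empty window [lo, hi)
        rw [not_le] at hwin
        set lo := max 0 (p.1 - context) with hlo_def
        set hi := min ((lines.length : Int)) (p.1 + context + 1) with hhi_def
        have hlo0 : 0 ≤ lo := by omega
        have hhin : hi ≤ (lines.length : Int) := by omega
        have hcov' : ∀ x : Int,
            x ∈ PySem.Set.update hits (PySem.List.pyRange lo hi 1) ↔ x ∈ hits ∨ (lo ≤ x ∧ x < hi) := by
          intro x
          rw [PySem.Set.mem_update, PySem.List.mem_pyRange_one]
        have hnd' := PySem.Set.nodup_update hits (PySem.List.pyRange lo hi 1) hnd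
        rcases List.eq_nil_or_concat ivs with rfl | ⟨zs, la, rfl⟩
        · -- no interval yet: start one
          have hB : pvBstep lines focus_terms context [] p = [(lo, hi)] := by
            simp only [pvBstep, hm, Bool.not_true, Bool.false_eq_true, if_false]
            rw [← hlo_def, ← hhi_def, if_neg (by omega : ¬ hi ≤ lo)]
            rfl
          rw [hA, hB]
          obtain ⟨b', hb', rest⟩ := ih _ [(lo, hi)] p.1 hEtail hEb' hnd' (by
              intro x
              rw [hcov' x, hcov x]
              simp) (by simp) (by
              intro iv hiv
              simp only [List.mem_singleton] at hiv
              subst hiv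
              exact ⟨hlo0, by omega, hhin, by omega, by omega⟩)
          exact ⟨b', by omega, rest⟩
        · simp only [List.concat_eq_append] at hcov hpw hbd hbd' ⊢
          have hla := hbd' la (by simp)
          have hgl : (zs ++ [la]).getLast? = some la := List.getLast?_concat
          obtain ⟨hzs_pw, -, hcross⟩ := List.pairwise_append.1 hpw
          by_cases hmerge : lo ≤ la.2
          · -- merge with the last interval
            have hB : pvBstep lines focus_terms context (zs ++ [la]) p = zs ++ [(la.1, hi)] := by
              simp only [pvBstep, hm, Bool.not_true, Bool.false_eq_true, if_false]
              rw [← hlo_def, ← hhi_def, if_neg (by omega : ¬ hi ≤ lo), hgl]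
              simp only [if_pos hmerge, List.dropLast_concat]
            rw [hA, hB]
            obtain ⟨b', hb', rest⟩ := ih _ (zs ++ [(la.1, hi)]) p.1 hEtail hEb' hnd' (by
                intro x
                rw [hcov' x, hcov x]
                simp only [List.mem_append, List.mem_singleton]
                constructor
                · rintro (⟨iv, hiv | hivla, hx1, hx2⟩ | ⟨hx1, hx2⟩)
                  · exact ⟨iv, Or.inl hiv, hx1, hx2⟩
                  · rw [hivla] at hx1 hx2
                    exact ⟨(la.1, hi), Or.inr rfl, hx1, by have := hla.2.2.2.2; dsimp at hx2 ⊢; omega⟩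
                  · exact ⟨(la.1, hi), Or.inr rfl, by have := hla.2.2.2.1; dsimp; omega, by dsimp; omega⟩
                · rintro ⟨iv, hiv | rfl, hx1, hx2⟩
                  · exact Or.inl ⟨iv, Or.inl hiv, hx1, hx2⟩
                  · dsimp at hx1 hx2
                    by_cases hxl : x < la.2
                    · exact Or.inl ⟨la, Or.inr rfl, hx1, hxl⟩
                    · exact Or.inr ⟨by omega, hx2⟩) (by
                rw [List.pairwise_append]
                refine ⟨hzs_pw, List.pairwise_singleton _ _, ?_⟩
                intro a ha iv hiv
                simp only [List.mem_singleton] at hiv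
                subst hiv
                exact hcross a ha la (by simp)) (by
                intro iv hiv
                rcases List.mem_append.1 hiv with h | h
                · exact hbd' iv (List.mem_append_left _ h)
                · simp only [List.mem_singleton] at h
                  subst h
                  refine ⟨by omega, by dsimp; omega, hhin, by dsimp; omega, by dsimp; omega⟩)
            exact ⟨b', by omega, rest⟩
          · -- a gap: append a new interval
            have hB : pvBstep lines focus_terms context (zs ++ [la]) p = (zs ++ [la]) ++ [(lo, hi)] := by
              simp only [pvBstep, hm, Bool.not_true, Bool.false_eq_true, if_false]
              rw [← hlo_def, ← hhi_def, if_neg (by omega : ¬ hi ≤ lo), hgl]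
              simp only [if_neg hmerge]
            rw [hA, hB]
            obtain ⟨b', hb', rest⟩ := ih _ ((zs ++ [la]) ++ [(lo, hi)]) p.1 hEtail hEb' hnd' (by
                intro x
                rw [hcov' x, hcov x]
                simp only [List.mem_append, List.mem_singleton]
                constructor
                · rintro (⟨iv, hiv, hx⟩ | ⟨hx1, hx2⟩)
                  · exact ⟨iv, Or.inl hiv, hx⟩
                  · exact ⟨(lo, hi), Or.inr rfl, hx1, hx2⟩
                · rintro ⟨iv, hiv | rfl, hx1, hx2⟩
                  · exact Or.inl ⟨iv, hiv, hx1, hx2⟩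
                  · exact Or.inr ⟨hx1, hx2⟩) (by
                rw [List.pairwise_append]
                refine ⟨hpw, List.pairwise_singleton _ _, ?_⟩
                intro a ha iv hiv
                simp only [List.mem_singleton] at hiv
                subst hiv
                rcases List.mem_append.1 ha with h | h
                · have h1 := hcross a h la (by simp)
                  have h2 := hla.2.1
                  dsimp
                  omega
                · simp only [List.mem_singleton] at h
                  subst h
                  dsimp
                  omega) (by
                intro iv hiv
                rcases List.mem_append.1 hiv with h | h
                · exact hbd' iv h
                · simp only [List.mem_singleton] at h
                  subst h
                  exact ⟨hlo0, by omega, hhin, by omega, by omega⟩)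
            exact ⟨b', by omega, rest⟩
    · -- no match: both sides skip the line
      have hA : pvAstep lines focus_terms context hits p = hits := by
        simp only [pvAstep, if_neg hm]
      have hmf : (focus_terms.any (fun t => PySem.Str.isIn (PySem.Str.lower t) (PySem.Str.lower p.2))) = false :=
        eq_false_of_ne_true hm
      have hB : pvBstep lines focus_terms context ivs p = ivs := by
        simp only [pvBstep, hmf, Bool.not_false, if_true]
      rw [hA, hB]
      obtain ⟨b', hb', rest⟩ := ih _ _ p.1 hEtail hEb' hnd hcov hpw hbd'
      exact ⟨b', by omega, rest⟩

-- the indices covered by pairwise-separated intervals, flattened, are pairwise increasing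
theorem pvFlatPW (ivs : List (Int × Int)) (hpw : ivs.Pairwise (fun a c => a.2 < c.1)) :
    (ivs.flatMap (fun iv => PySem.List.pyRange iv.1 iv.2 1)).Pairwise (· < ·) := by
  induction ivs with
  | nil => simp
  | cons iv tl ih =>
    obtain ⟨hhd, htl⟩ := List.pairwise_cons.1 hpw
    simp only [List.flatMap_cons]
    rw [List.pairwise_append]
    refine ⟨PySem.List.pairwise_lt_pyRange_one iv.1 iv.2, ih htl, ?_⟩
    intro x hx y hy
    obtain ⟨jv, hjv, hyj⟩ := List.mem_flatMap.1 hy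
    have hx' := (PySem.List.mem_pyRange_one).1 hx
    have hy' := (PySem.List.mem_pyRange_one).1 hyj
    have := hhd jv hjv
    omega

-- sorted(hits) is exactly the flattened intervals
theorem pvSortedEq (hits : List Int) (ivs : List (Int × Int))
    (hnd : hits.Nodup)
    (hcov : ∀ x : Int, x ∈ hits ↔ ∃ iv ∈ ivs, iv.1 ≤ x ∧ x < iv.2)
    (hpw : ivs.Pairwise (fun a c => a.2 < c.1)) :
    PySem.List.sorted hits (fun x => x) = ivs.flatMap (fun iv => PySem.List.pyRange iv.1 iv.2 1) := by
  apply PySem.List.sorted_eq_of_perm_of_pairwise_lt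
  · refine (List.perm_ext_iff_of_nodup ((pvFlatPW ivs hpw).imp ne_of_lt) hnd).2 ?_
    intro x
    rw [List.mem_flatMap, hcov x]
    constructor
    · rintro ⟨iv, hiv, hx⟩
      exact ⟨iv, hiv, ((PySem.List.mem_pyRange_one).1 hx)⟩
    · rintro ⟨iv, hiv, hx1, hx2⟩
      exact ⟨iv, hiv, (PySem.List.mem_pyRange_one).2 ⟨hx1, hx2⟩⟩
  · exact pvFlatPW ivs hpw

-- A's emit loop over one contiguous run, after the run has started (prev = a - 1)
theorem pvEmit2 (lines : List String) (a b : Int) (res : List String) (h : a ≤ b) :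
    (PySem.List.pyRange a b 1).foldl (fun st i =>
      ((if st.2 + 1 < i then st.1 ++ ["  ..."] else st.1) ++ [PySem.List.pyGetD lines i ""], i)) (res, a - 1)
    = (res ++ (PySem.List.pyRange a b 1).map (fun i => PySem.List.pyGetD lines i ""), max (a - 1) (b - 1)) := by
  obtain ⟨k, hk⟩ : ∃ k : Nat, b - a = (k : Int) := ⟨(b - a).toNat, by omega⟩
  induction k generalizing a res with
  | zero =>
    have hba : b = a := by omega
    subst hba
    simp
  | succ k ih =>
    have hab : a < b := by omega
    rw [PySem.List.pyRange_one_cons hab]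
    simp only [List.foldl_cons, List.map_cons]
    have hstep : ((if a - 1 + 1 < a then res ++ ["  ..."] else res) ++ [PySem.List.pyGetD lines a ""], a)
        = (res ++ [PySem.List.pyGetD lines a ""], (a + 1) - 1) := by
      rw [if_neg (by omega)]
      congr 1
      omega
    rw [hstep, ih (a + 1) (res ++ [PySem.List.pyGetD lines a ""]) (by omega) (by omega)]
    simp only [List.append_assoc, List.singleton_append]
    congr 1
    omega

-- A's emit loop over one whole interval: one '  ...' then the run
theorem pvEmit1 (lines : List String) (lo hi prev : Int) (res : List String)
    (h1 : prev + 1 < lo) (h2 : lo < hi) :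
    (PySem.List.pyRange lo hi 1).foldl (fun st i =>
      ((if st.2 + 1 < i then st.1 ++ ["  ..."] else st.1) ++ [PySem.List.pyGetD lines i ""], i)) (res, prev)
    = (res ++ "  ..." :: (PySem.List.pyRange lo hi 1).map (fun i => PySem.List.pyGetD lines i ""), hi - 1) := by
  rw [PySem.List.pyRange_one_cons h2]
  simp only [List.foldl_cons, List.map_cons]
  have hstep : ((if prev + 1 < lo then res ++ ["  ..."] else res) ++ [PySem.List.pyGetD lines lo ""], lo)
      = ((res ++ ["  ..."]) ++ [PySem.List.pyGetD lines lo ""], (lo + 1) - 1) := by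
    rw [if_pos h1]
    congr 1
    omega
  rw [hstep, pvEmit2 lines (lo + 1) hi _ (by omega)]
  simp only [List.append_assoc, List.singleton_append, Prod.mk.injEq]
  exact ⟨rfl, by omega⟩

-- A's emit loop over the flattened intervals is B's per-interval emission
theorem pvEmit3 (lines : List String) (ivs : List (Int × Int)) (res : List String) (prev : Int)
    (hlo : ∀ iv ∈ ivs, prev + 1 < iv.1 ∧ iv.1 < iv.2)
    (hpw : ivs.Pairwise (fun a c => a.2 < c.1)) :
    (ivs.flatMap (fun iv => PySem.List.pyRange iv.1 iv.2 1)).foldl (fun st i =>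
      ((if st.2 + 1 < i then st.1 ++ ["  ..."] else st.1) ++ [PySem.List.pyGetD lines i ""], i)) (res, prev)
    = (ivs.foldl (fun out iv => (out ++ ["  ..."]) ++ (PySem.List.pyRange iv.1 iv.2 1).map (fun i => PySem.List.pyGetD lines i "")) res,
       ivs.foldl (fun _ iv => iv.2 - 1) prev) := by
  induction ivs generalizing res prev with
  | nil => rfl
  | cons iv tl ih =>
    have hiv := hlo iv (by simp)
    simp only [List.flatMap_cons, List.foldl_append, List.foldl_cons]
    rw [pvEmit1 lines iv.1 iv.2 prev res hiv.1 hiv.2]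
    rw [ih _ (iv.2 - 1) (fun jv hjv => ⟨by have := (List.pairwise_cons.1 hpw).1 jv hjv; omega, (hlo jv (by simp [hjv])).2⟩) (List.pairwise_cons.1 hpw).2]
    simp

-- a slice with in-range bounds is the map of pyGetD over the index range
theorem pvSliceEq (xs : List String) (a b : Int) (h0 : 0 ≤ a) (hab : a ≤ b) (hbn : b ≤ (xs.length : Int)) :
    PySem.List.slice xs (some a) (some b) = (PySem.List.pyRange a b 1).map (fun i => PySem.List.pyGetD xs i "") := by
  rw [PySem.List.slice_toNat xs h0 (by omega : (0:Int) ≤ b), PySem.List.pyRange_one]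
  apply List.ext_getElem
  · simp
    omega
  · intro k hk1 hk2
    have hk : k < b.toNat - a.toNat := by
      simp only [List.length_take, List.length_drop, lt_min_iff] at hk1
      omega
    simp only [List.getElem_take, List.getElem_drop, List.getElem_map, List.getElem_range]
    rw [PySem.List.pyGetD_eq_getElem xs "" (by omega) (by omega)]
    have hidx : (a + (k : Int)).toNat = a.toNat + k := by omega
    simp [hidx]

-- assembling the two emission phases, given the invariant facts about hits and intervals
theorem pvFinal (lines : List String) (hits : List Int) (ivs : List (Int × Int))
    (hnd : hits.Nodup)
    (hcov : ∀ x : Int, x ∈ hits ↔ ∃ iv ∈ ivs, iv.1 ≤ x ∧ x < iv.2)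
    (hpw : ivs.Pairwise (fun a c => a.2 < c.1))
    (hbd : ∀ iv ∈ ivs, 0 ≤ iv.1 ∧ iv.1 < iv.2 ∧ iv.2 ≤ (lines.length : Int))
    (hne : ivs ≠ []) :
    (if (pvAEmit lines (PySem.List.sorted hits (fun x => x))).2 < (lines.length : Int) - 1 then
      (pvAEmit lines (PySem.List.sorted hits (fun x => x))).1 ++ ["  ..."]
    else
      (pvAEmit lines (PySem.List.sorted hits (fun x => x))).1)
    = (ivs.foldl (fun out iv => (out ++ ["  ..."]) ++ PySem.List.slice lines (some iv.1) (some iv.2)) [])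
      ++ (if (PySem.List.pyGetD ivs (-1) ((0 : Int), (0 : Int))).2 < (lines.length : Int) then ["  ..."] else []) := by
  rcases List.eq_nil_or_concat ivs with rfl | ⟨ws, lastiv, rfl⟩
  · exact absurd rfl hne
  · simp only [List.concat_eq_append] at hcov hpw hbd ⊢
    rw [pvSortedEq hits _ hnd hcov hpw]
    unfold pvAEmit
    rw [pvEmit3 lines _ [] (-2)
      (fun iv hiv => ⟨by have := (hbd iv hiv).1; omega, (hbd iv hiv).2.1⟩) hpw]
    have hslice : (ws ++ [lastiv]).foldl
        (fun out iv => (out ++ ["  ..."]) ++ (PySem.List.pyRange iv.1 iv.2 1).map (fun i => PySem.List.pyGetD lines i "")) []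
        = (ws ++ [lastiv]).foldl (fun out iv => (out ++ ["  ..."]) ++ PySem.List.slice lines (some iv.1) (some iv.2)) [] := by
      apply PySem.List.foldl_congr_mem
      intro acc iv hiv
      have h := hbd iv hiv
      rw [pvSliceEq lines iv.1 iv.2 h.1 (le_of_lt h.2.1) h.2.2]
    have hprev : (ws ++ [lastiv]).foldl (fun _ iv => iv.2 - 1) (-2 : Int) = lastiv.2 - 1 := by
      rw [List.foldl_append]
      rfl
    rw [hslice, hprev, PySem.List.pyGetD_neg_one_append_singleton]
    by_cases hlast : lastiv.2 < (lines.length : Int)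
    · rw [if_pos (by omega), if_pos hlast]
    · rw [if_neg (by omega), if_neg hlast, List.append_nil]

-- ===== VERDICT (by name: the statement is the Claim_ definition above) =====
theorem focus_around_py_spec : Claim_equal_focus_around_py := by
  intro lines focus_terms context _dom
  unfold Spec_focus_around_py
  obtain ⟨b', hb', hnd, hcov, hpw, hbd⟩ := pvJoint lines focus_terms context
    (PySem.List.enumerate lines) [] [] 0
    (PySem.List.pairwise_lt_enumerate lines 0)
    (by
      intro p hp
      obtain ⟨k, hk, rfl⟩ := (PySem.List.mem_enumerate_iff lines 0 p).1 hp
      simp)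
    List.nodup_nil
    (by intro x; simp)
    (by simp)
    (by simp)
  have hAh : List.foldl (pvAstep lines focus_terms context) [] (PySem.List.enumerate lines)
      = pvAHits lines focus_terms context := rfl
  have hBh : List.foldl (pvBstep lines focus_terms context) [] (PySem.List.enumerate lines)
      = pvBIntervals lines focus_terms context := rfl
  rw [hAh] at hnd hcov
  rw [hBh] at hcov hpw hbd
  have hempty : pvAHits lines focus_terms context = [] ↔ pvBIntervals lines focus_terms context = [] := by
    constructor
    · intro h
      by_contra hne
      obtain ⟨iv, hiv⟩ := List.exists_mem_of_ne_nil _ hne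
      have hx := (hcov iv.1).2 ⟨iv, hiv, le_refl _, (hbd iv hiv).2.1⟩
      rw [h] at hx
      exact absurd hx (List.not_mem_nil)
    · intro h
      rw [List.eq_nil_iff_forall_not_mem]
      intro x hx
      obtain ⟨iv, hiv, -⟩ := (hcov x).1 hx
      rw [h] at hiv
      exact absurd hiv (List.not_mem_nil)
  unfold focus_around_py focus_around_py_alt
  by_cases hnil : lines = []
  · subst hnil
    rw [if_pos rfl]
    have hBnil : pvBIntervals ([] : List String) focus_terms context = [] := rfl
    rw [if_pos hBnil]
  · rw [if_neg hnil]
    by_cases hAe : pvAHits lines focus_terms context = []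
    · rw [if_pos hAe, if_pos (hempty.1 hAe)]
    · rw [if_neg hAe, if_neg (fun h => hAe (hempty.2 h))]
      exact pvFinal lines (pvAHits lines focus_terms context) (pvBIntervals lines focus_terms context)
        hnd hcov hpw (fun iv hiv => ⟨(hbd iv hiv).1, (hbd iv hiv).2.1, (hbd iv hiv).2.2.1⟩)
        (fun h => hAe (hempty.2 h))
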